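-- pv_equiv track=rewrite | github.com/hghyhghy/Codechef-Coding-Ninja | Desktop/DSA/T26/7.py | reverse_after_position
-- ===== SOURCE A (Python) =====
-- def reverse_after_position(arr,position):
--
--     if position < 0 or position >= len(arr) -1:
--
--         return arr
--
--     start=position+1
--     end = len(arr) - 1
--
--     while start < end:
--
--         arr[start],arr[end] = arr[end],arr[start]
--
--         start += 1
--         end -= 1
--
--     return arr
-- ===== SOURCE B (Python) =====
-- def reverse_after_position(arr, position):
--     if position < 0 or position >= len(arr) - 1:
--         return arr
--     start = position + 1
--     arr[start:] = arr[start:][::-1]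
--     return arr
-- ===== Notes on version B (the rewrite author's own statement) =====
-- stated objective: simpler
-- what changed: Replaces the explicit two-pointer swap loop with a single slice-reversal assignment of the suffix (same in-place mutation of the list).
import Mathlib
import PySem

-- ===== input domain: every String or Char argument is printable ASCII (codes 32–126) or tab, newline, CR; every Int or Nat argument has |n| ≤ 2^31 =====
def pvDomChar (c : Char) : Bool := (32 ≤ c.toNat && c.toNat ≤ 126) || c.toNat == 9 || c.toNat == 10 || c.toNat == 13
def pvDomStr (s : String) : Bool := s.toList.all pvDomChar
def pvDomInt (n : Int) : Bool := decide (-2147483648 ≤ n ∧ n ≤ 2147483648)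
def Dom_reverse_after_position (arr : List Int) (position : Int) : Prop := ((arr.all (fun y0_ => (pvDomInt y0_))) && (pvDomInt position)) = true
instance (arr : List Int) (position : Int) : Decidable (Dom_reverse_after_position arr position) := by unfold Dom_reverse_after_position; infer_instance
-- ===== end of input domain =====

-- ===== PORT A =====
-- B changes: replaces the two-pointer swap loop with a slice-reversal suffix assignment (objective: simpler).
-- Both Pythons mutate arr in place identically and return it; the equivalence proved here is about the return value.
def swapLoop (arr : List Int) (s e : Nat) : List Int :=
  if s < e then
    swapLoop ((arr.set s (arr.getD e 0)).set e (arr.getD s 0)) (s + 1) (e - 1)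
  else arr
termination_by e - s
decreasing_by omega

def reverse_after_position (arr : List Int) (position : Int) : List Int :=
  if position < 0 ∨ position ≥ (arr.length : Int) - 1 then arr
  else swapLoop arr (position + 1).toNat (arr.length - 1)

-- ===== PORT B =====
def reverse_after_position_alt (arr : List Int) (position : Int) : List Int :=
  if position < 0 ∨ position ≥ (arr.length : Int) - 1 then arr
  else arr.take (position + 1).toNat ++ (arr.drop (position + 1).toNat).reverse

-- ===== PRECONDITION & SPEC =====
def Spec_reverse_after_position (arr : List Int) (position : Int) (out : List Int) : Prop := out = reverse_after_position_alt arr position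
instance (arr : List Int) (position : Int) (out : List Int) : Decidable (Spec_reverse_after_position arr position out) := by unfold Spec_reverse_after_position; infer_instance

-- ===== CLAIM (what is proved, stated in full; the proofs are below) =====
def Claim_equal_reverse_after_position : Prop := ∀ (arr : List Int) (position : Int), Dom_reverse_after_position arr position → Spec_reverse_after_position arr position (reverse_after_position arr position)

-- ===== LEMMAS AND PROOFS =====
lemma swapLoop_length (arr : List Int) (s e : Nat) : (swapLoop arr s e).length = arr.length := by
  unfold swapLoop
  split
  · rw [swapLoop_length]; simp
  · rfl
termination_by e - s
decreasing_by omega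

lemma set_swap_getElem? (arr : List Int) (s e : Nat) (hse : s < e) (he : e < arr.length) (j : Nat) :
    ((arr.set s (arr.getD e 0)).set e (arr.getD s 0))[j]? =
      if j = s then arr[e]? else if j = e then arr[s]? else arr[j]? := by
  have hx : arr.getD e 0 = arr[e]'he := List.getD_eq_getElem _ _ he
  have hy : arr.getD s 0 = arr[s]'(by omega) := List.getD_eq_getElem _ _ (by omega)
  by_cases hj : j < arr.length
  · rw [List.getElem?_set_of_lt _ _ (by simpa using hj), List.getElem?_set_of_lt _ _ hj]
    by_cases hjs : j = s
    · subst hjs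
      rw [if_neg (show e ≠ j by omega), if_pos rfl, if_pos rfl, hx,
        List.getElem?_eq_getElem he]
    · by_cases hje : j = e
      · subst hje
        rw [if_pos rfl, if_neg hjs, if_pos rfl, hy,
          List.getElem?_eq_getElem (show s < arr.length by omega)]
      · rw [if_neg (show e ≠ j by omega), if_neg (show s ≠ j by omega),
          if_neg hjs, if_neg hje]
  · rw [List.getElem?_eq_none (by simp; omega), if_neg (show j ≠ s by omega),
      if_neg (show j ≠ e by omega), List.getElem?_eq_none (by omega)]

lemma swapLoop_getElem? (arr : List Int) (s e : Nat) (he : e < arr.length) (i : Nat) :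
    (swapLoop arr s e)[i]? = if s ≤ i ∧ i ≤ e then arr[s + e - i]? else arr[i]? := by
  unfold swapLoop
  split
  · rename_i hse
    have hlen : ((arr.set s (arr.getD e 0)).set e (arr.getD s 0)).length = arr.length := by simp
    rw [swapLoop_getElem? _ _ _ (by omega)]
    have hget := set_swap_getElem? arr s e hse he
    by_cases hin : s + 1 ≤ i ∧ i ≤ e - 1
    · rw [if_pos hin, if_pos (by omega)]
      have : s + 1 + (e - 1) - i = s + e - i := by omega
      rw [this, hget]
      have h1 : s + e - i ≠ s := by omega
      have h2 : s + e - i ≠ e := by omega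
      simp [h1, h2]
    · rw [if_neg hin, hget]
      by_cases his : i = s
      · subst his
        rw [if_pos rfl, if_pos (by omega)]
        congr 1; omega
      · by_cases hie : i = e
        · subst hie
          rw [if_neg his, if_pos rfl, if_pos (by omega)]
          congr 1; omega
        · rw [if_neg his, if_neg hie, if_neg (by omega)]
  · rename_i hse
    by_cases hin : s ≤ i ∧ i ≤ e
    · rw [if_pos hin]
      congr 1; omega
    · rw [if_neg hin]
termination_by e - s
decreasing_by omega

lemma suffix_rev_getElem? (arr : List Int) (s : Nat) (hs : s ≤ arr.length) (i : Nat) :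
    (arr.take s ++ (arr.drop s).reverse)[i]? =
      if s ≤ i ∧ i ≤ arr.length - 1 then arr[s + (arr.length - 1) - i]? else arr[i]? := by
  have hts : (arr.take s).length = s := by simp only [List.length_take]; omega
  have htr : (arr.drop s).reverse.length = arr.length - s := by
    simp only [List.length_reverse, List.length_drop]
  by_cases hi : i < arr.length
  · rw [List.getElem?_append]
    by_cases his : i < s
    · rw [if_pos (by omega : i < (arr.take s).length), if_neg (by omega),
        List.getElem?_take]
      simp only [his, ite_true]
    · rw [if_neg (by omega), if_pos (by omega)]
      have hlt : i - (arr.take s).length < (arr.drop s).reverse.length := by omega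
      have hlt2 : s + (arr.length - 1) - i < arr.length := by omega
      rw [List.getElem?_eq_getElem hlt, List.getElem?_eq_getElem hlt2]
      congr 1
      rw [List.getElem_reverse, List.getElem_drop]
      congr 1
      simp only [List.length_drop, hts]
      omega
  · have hlen : (arr.take s ++ (arr.drop s).reverse).length = arr.length := by
      simp only [List.length_append, hts, htr]; omega
    rw [List.getElem?_eq_none (by omega)]
    split
    · rw [List.getElem?_eq_none (by omega)]
    · rw [List.getElem?_eq_none (by omega)]

-- ===== VERDICT (by name: the statement is the Claim_ definition above) =====
theorem reverse_after_position_spec : Claim_equal_reverse_after_position := by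
  intro arr position _
  unfold Spec_reverse_after_position reverse_after_position reverse_after_position_alt
  split
  · rfl
  · rename_i h
    rw [not_or] at h; simp only [not_lt, not_le] at h
    obtain ⟨h0, h1⟩ := h
    have hlen : 2 ≤ arr.length := by omega
    have hs : (position + 1).toNat ≤ arr.length := by omega
    apply List.ext_getElem?
    intro i
    rw [swapLoop_getElem? _ _ _ (by omega), suffix_rev_getElem? _ _ hs]
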